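-- pv_equiv track=rewrite | github.com/MrBrantCode/unitest_baseline | mut_generate/mist_train_taco/taco_15580/solution.py | can_build_string
-- ===== SOURCE A (Python) =====
-- def can_build_string(s: str, t: str) -> str:
--     def can_build_subsequence(s, t):
--         j = 0
--         ptr = 0
--         while j < len(s) and ptr < len(t):
--             if s[j] == t[ptr]:
--                 ptr += 1
--             j += 1
--         return ptr == len(t)
--
--     if can_build_subsequence(s, t):
--         return "YES"
--
--     pos = [0] * 26
--     for char in s:
--         pos[ord(char) - 97] += 1
--
--     for i in range(len(t)):
--         h = pos[:]
--         if not can_build_subsequence(s, t[:i+1]):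
--             continue
--         if can_build_subsequence(s, t[i+1:]):
--             return "YES"
--
--     return "NO"
-- ===== SOURCE B (Python) =====
-- def can_build_string(s: str, t: str) -> str:
--     n = len(t)
--     p = 0
--     for c in s:
--         if p < n and c == t[p]:
--             p += 1
--     q = 0
--     for c in reversed(s):
--         if q < n and c == t[n - 1 - q]:
--             q += 1
--     return "YES" if p + q >= n else "NO"
-- ===== Notes on version B (the rewrite author's own statement) =====
-- stated objective: faster
-- what changed: Instead of re-running a greedy subsequence check for every split point of t (O(|t|*(|s|+|t|))), B computes in two greedy passes the longest prefix p and longest suffix q of t matchable as subsequences of s and answers YES iff p+q >= len(t), in O(|s|+|t|).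
import Mathlib
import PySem

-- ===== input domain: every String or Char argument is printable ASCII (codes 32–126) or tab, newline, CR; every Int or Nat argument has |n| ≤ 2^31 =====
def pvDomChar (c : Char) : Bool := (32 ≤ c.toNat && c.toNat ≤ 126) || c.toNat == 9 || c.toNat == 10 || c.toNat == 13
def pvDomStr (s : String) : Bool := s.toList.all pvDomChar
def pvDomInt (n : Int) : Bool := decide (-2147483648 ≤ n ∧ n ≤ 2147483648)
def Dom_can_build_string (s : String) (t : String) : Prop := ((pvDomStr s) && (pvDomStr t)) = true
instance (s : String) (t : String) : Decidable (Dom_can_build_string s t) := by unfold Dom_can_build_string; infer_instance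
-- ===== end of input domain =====

-- B replaces A's per-split-point subsequence rechecking (O(|t|·(|s|+|t|))) by two greedy
-- passes computing the longest matchable prefix and suffix of t, then one arithmetic check
-- (O(|s|+|t|)).

-- ===== PORT A =====

-- A's inner while loop of can_build_subsequence: j walks s, ptr walks t greedily.
-- (the loop guard keeps both indices in range, so List.getD is exact for s[j] / t[ptr])
def cbsGo (s t : List Char) (j ptr : Nat) : Nat :=
  if _h : j < s.length ∧ ptr < t.length then
    cbsGo s t (j + 1) (if s.getD j default = t.getD ptr default then ptr + 1 else ptr)
  else ptr
termination_by s.length - j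
decreasing_by omega

-- can_build_subsequence(s, t): run the loop, then 'return ptr == len(t)'
def canBuildSub (s t : List Char) : Bool := cbsGo s t 0 0 == t.length

-- 'for char in s: pos[ord(char) - 97] += 1' — Python index may be negative (wraparound)
-- or out of range (IndexError = none); pos[i] += 1 reads then writes the same index.
def buildPos : List Char → List Int → Option (List Int)
  | [], pos => some pos
  | c :: cs, pos =>
    match PySem.List.pyGet? pos ((c.toNat : Int) - 97) with
    | none => none
    | some v =>
      match PySem.List.pySet? pos ((c.toNat : Int) - 97) (v + 1) with
      | none => none
      | some pos' => buildPos cs pos'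

-- 'for i in range(len(t)): h = pos[:]; if not …: continue; if …: return "YES"' / final 'return "NO"'
-- (t[:i+1] / t[i+1:] with 0 ≤ i+1 are List.take / List.drop, exactly Python's slices)
def splitLoop (s t : List Char) (pos : List Int) (i : Nat) : String :=
  if i < t.length then
    let _h := pos   -- h = pos[:] (never read afterwards, as in A)
    if canBuildSub s (t.take (i + 1)) then
      if canBuildSub s (t.drop (i + 1)) then "YES" else splitLoop s t pos (i + 1)
    else splitLoop s t pos (i + 1)
  else "NO"
termination_by t.length - i

def can_build_string (s : String) (t : String) : String :=
  if canBuildSub s.toList t.toList then "YES"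
  else
    match buildPos s.toList (List.replicate 26 0) with
    | none => "NO"   -- here Python raises IndexError; excluded by Pre_can_build_string
    | some pos => splitLoop s.toList t.toList pos 0

-- ===== PORT B =====

def can_build_string_alt (s : String) (t : String) : String :=
  let tl := t.toList
  let n := tl.length
  -- p: longest prefix of t greedily matchable as a subsequence of s
  let p := s.toList.foldl (fun p c => if p < n ∧ c = tl.getD p default then p + 1 else p) 0
  -- q: longest suffix of t greedily matchable, scanning s backwards ('for c in reversed(s)')
  let q := s.toList.reverse.foldl
    (fun q c => if q < n ∧ c = tl.getD (n - 1 - q) default then q + 1 else q) 0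
  if n ≤ p + q then "YES" else "NO"

-- ===== PRECONDITION & SPEC =====
-- Pre_ excludes exactly the inputs on which A raises IndexError: when t is not a subsequence
-- of s, A's dead counting loop evaluates pos[ord(c)-97] for every c in s, which raises unless
-- every ord(c) lies in [71,122] (indices -26..25 are in range for the 26-slot list).
def Pre_can_build_string (s : String) (t : String) : Prop :=
  s.toList.all (fun c => decide (71 ≤ c.toNat) && decide (c.toNat ≤ 122)) = true
    ∨ t.toList.Sublist s.toList
instance (s : String) (t : String) : Decidable (Pre_can_build_string s t) := by
  unfold Pre_can_build_string; infer_instance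

def pvWitness_can_build_string : String × String := ("abacb", "bbc")

def Spec_can_build_string (s : String) (t : String) (out : String) : Prop := out = can_build_string_alt s t
instance (s : String) (t : String) (out : String) : Decidable (Spec_can_build_string s t out) := by unfold Spec_can_build_string; infer_instance

-- ===== CLAIM (what is proved, stated in full; the proofs are below) =====
def Claim_equal_can_build_string : Prop := ∀ (s : String) (t : String), Dom_can_build_string s t → Pre_can_build_string s t → Spec_can_build_string s t (can_build_string s t)


-- ===== LEMMAS AND PROOFS =====

-- gm s t: the number of characters of t matched by the left-to-right greedy subsequence scan.
def gm : List Char → List Char → Nat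
  | [], _ => 0
  | _ :: _, [] => 0
  | c :: s, x :: t => if c = x then gm s t + 1 else gm s (x :: t)

theorem gm_nil_right (s : List Char) : gm s [] = 0 := by cases s <;> rfl

theorem gm_le (s t : List Char) : gm s t ≤ t.length := by
  induction s generalizing t with
  | nil => simp [gm]
  | cons c s ih =>
    cases t with
    | nil => simp [gm]
    | cons x t =>
      simp only [gm]
      split
      · have := ih t; simp; omega
      · have := ih (x :: t); simpa using this

theorem gm_take (s t : List Char) (k : Nat) : gm s (t.take k) = min k (gm s t) := by
  induction s generalizing t k with
  | nil => simp [gm]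
  | cons c s ih =>
    cases t with
    | nil => simp [gm_nil_right, gm]
    | cons x t =>
      cases k with
      | zero => simp [gm_nil_right]
      | succ k =>
        simp only [List.take_succ_cons, gm]
        split
        · rw [ih t k]; omega
        · exact ih (x :: t) (k + 1)

theorem take_gm_sublist (s t : List Char) : (t.take (gm s t)).Sublist s := by
  induction s generalizing t with
  | nil => simp [gm]
  | cons c s ih =>
    cases t with
    | nil => simp [gm]
    | cons x t =>
      simp only [gm]
      split
      · rename_i h
        rw [List.take_succ_cons, h]
        exact (ih t).cons₂ x
      · exact (ih (x :: t)).cons c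

theorem gm_ge_of_sublist_prefix (s t u : List Char) (hs : u.Sublist s) (hp : u.IsPrefix t) :
    u.length ≤ gm s t := by
  induction s generalizing t u with
  | nil => simp_all
  | cons c s ih =>
    cases u with
    | nil => simp
    | cons a u =>
      cases t with
      | nil => exact absurd (List.IsPrefix.length_le hp) (by simp)
      | cons x t =>
        obtain ⟨hax, hut⟩ := List.cons_prefix_cons.mp hp
        subst hax
        simp only [gm]
        split
        · rename_i hcx
          have hu : u.Sublist s := by
            cases hs with
            | cons _ h => exact List.sublist_of_cons_sublist h
            | cons₂ _ h => exact h
          have := ih t u hu hut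
          simpa using Nat.succ_le_succ this
        · rename_i hcx
          have hxu : (a :: u).Sublist s := by
            cases hs with
            | cons _ h => exact h
            | cons₂ _ h => exact absurd rfl hcx
          exact ih (a :: t) (a :: u) hxu hp

theorem gm_eq_length_iff (s t : List Char) : gm s t = t.length ↔ t.Sublist s := by
  constructor
  · intro h
    have := take_gm_sublist s t
    rwa [h, List.take_length] at this
  · intro h
    have h1 := gm_ge_of_sublist_prefix s t t h (List.prefix_refl t)
    have h2 := gm_le s t
    omega

theorem cbsGo_eq (s t : List Char) : ∀ (d j ptr : Nat), s.length - j = d →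
    cbsGo s t j ptr = ptr + gm (s.drop j) (t.drop ptr) := by
  intro d
  induction d with
  | zero =>
    intro j ptr hd
    rw [cbsGo]
    rw [dif_neg (by omega)]
    rw [List.drop_eq_nil_of_le (by omega)]
    simp [gm]
  | succ d ih =>
    intro j ptr hd
    rw [cbsGo]
    by_cases hptr : ptr < t.length
    · have hj : j < s.length := by omega
      rw [dif_pos ⟨hj, hptr⟩]
      have hsd : s.drop j = s[j] :: s.drop (j + 1) := (List.getElem_cons_drop hj).symm
      have htd : t.drop ptr = t[ptr] :: t.drop (ptr + 1) := (List.getElem_cons_drop hptr).symm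
      rw [List.getD_eq_getElem s default hj, List.getD_eq_getElem t default hptr]
      by_cases hc : s[j] = t[ptr]
      · rw [if_pos hc, ih (j + 1) (ptr + 1) (by omega), hsd, htd]
        simp only [gm, if_pos hc]
        omega
      · rw [if_neg hc, ih (j + 1) ptr (by omega), hsd, htd]
        simp only [gm, if_neg hc]
    · rw [dif_neg (by omega)]
      rw [List.drop_eq_nil_of_le (show t.length ≤ ptr by omega), gm_nil_right]
      omega

theorem canBuildSub_iff (s t : List Char) : canBuildSub s t = true ↔ gm s t = t.length := by
  unfold canBuildSub
  rw [cbsGo_eq s t s.length 0 0 (by omega)]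
  simp

theorem canBuildSub_iff_sublist (s t : List Char) : canBuildSub s t = true ↔ t.Sublist s := by
  rw [canBuildSub_iff, gm_eq_length_iff]

theorem canBuildSub_take_iff (sl tl : List Char) (k : Nat) (hk : k ≤ tl.length) :
    canBuildSub sl (tl.take k) = true ↔ k ≤ gm sl tl := by
  rw [canBuildSub_iff, gm_take]
  have := gm_le sl tl
  simp only [List.length_take]
  omega

theorem canBuildSub_drop_iff (sl tl : List Char) (k : Nat) (hk : k ≤ tl.length) :
    canBuildSub sl (tl.drop k) = true ↔ tl.length - k ≤ gm sl.reverse tl.reverse := by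
  rw [canBuildSub_iff_sublist, ← List.reverse_sublist, List.reverse_drop,
    ← gm_eq_length_iff, gm_take]
  have := gm_le sl.reverse tl.reverse
  simp only [List.length_take, List.length_reverse] at *
  omega

theorem foldP_eq (tl : List Char) : ∀ (s : List Char) (p : Nat),
    s.foldl (fun p c => if p < tl.length ∧ c = tl.getD p default then p + 1 else p) p
      = p + gm s (tl.drop p) := by
  intro s
  induction s with
  | nil => intro p; simp [gm]
  | cons c s ih =>
    intro p
    simp only [List.foldl_cons]
    by_cases hp : p < tl.length
    · have hdrop : tl.drop p = tl[p] :: tl.drop (p + 1) := (List.getElem_cons_drop hp).symm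
      rw [List.getD_eq_getElem tl default hp]
      by_cases hc : c = tl[p]
      · rw [if_pos ⟨hp, hc⟩, ih (p + 1), hdrop]
        simp only [gm, if_pos hc]
        omega
      · rw [if_neg (by tauto), ih p, hdrop]
        simp only [gm, if_neg hc]
    · rw [if_neg (by simp; omega), ih p]
      rw [List.drop_eq_nil_of_le (by omega), gm_nil_right, gm_nil_right]

theorem foldQ_eq (tl s : List Char) :
    s.foldl (fun q c => if q < tl.length ∧ c = tl.getD (tl.length - 1 - q) default then q + 1 else q) 0
      = gm s tl.reverse := by
  have hfun : (fun q c => if q < tl.length ∧ c = tl.getD (tl.length - 1 - q) default then q + 1 else q)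
      = (fun q c => if q < tl.reverse.length ∧ c = tl.reverse.getD q default then q + 1 else q) := by
    funext q c
    by_cases hq : q < tl.length
    · have hg : tl.reverse.getD q default = tl.getD (tl.length - 1 - q) default := by
        rw [List.getD_eq_getElem _ _ (by simpa), List.getD_eq_getElem _ _ (by omega)]
        exact List.getElem_reverse _
      simp only [List.length_reverse, hg]
    · simp [hq]
  rw [hfun, foldP_eq tl.reverse s 0]
  simp

theorem buildPos_some (cs : List Char) (h : ∀ c ∈ cs, 71 ≤ c.toNat ∧ c.toNat ≤ 122) :
    ∀ pos : List Int, pos.length = 26 → ∃ r, buildPos cs pos = some r := by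
  induction cs with
  | nil => intro pos _; exact ⟨pos, rfl⟩
  | cons c cs ih =>
    intro pos hlen
    have hc := h c List.mem_cons_self
    have hin : PySem.Raise.InRange pos.length ((c.toNat : Int) - 97) := by
      rw [hlen]
      simp only [PySem.Raise.InRange]
      omega
    obtain ⟨v, hv⟩ := Option.ne_none_iff_exists'.mp
      (fun hnone => ((PySem.List.pyGet?_eq_none_iff pos ((c.toNat : Int) - 97)).mp hnone) hin)
    obtain ⟨pos', hset⟩ := Option.ne_none_iff_exists'.mp
      (fun hnone => ((PySem.List.pySet?_eq_none_iff pos ((c.toNat : Int) - 97) (v + 1)).mp hnone) hin)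
    have hlen' : pos'.length = 26 := by
      have := PySem.List.length_pySetD pos ((c.toNat : Int) - 97) (v + 1)
      rw [PySem.List.pySetD, hset] at this
      simpa [hlen] using this
    obtain ⟨r, hr⟩ := ih (fun x hx => h x (List.mem_cons_of_mem c hx)) pos' hlen'
    exact ⟨r, by rw [buildPos, hv]; dsimp only; rw [hset]; dsimp only; exact hr⟩

theorem splitLoop_yes (s t : List Char) (pos : List Int) :
    ∀ (d i j : Nat), j - i = d → i ≤ j → j < t.length →
      canBuildSub s (t.take (j + 1)) = true → canBuildSub s (t.drop (j + 1)) = true →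
      splitLoop s t pos i = "YES" := by
  intro d
  induction d with
  | zero =>
    intro i j hd hij hj h1 h2
    have hij' : i = j := by omega
    subst hij'
    rw [splitLoop, if_pos hj]
    simp [h1, h2]
  | succ d ih =>
    intro i j hd hij hj h1 h2
    rw [splitLoop, if_pos (by omega)]
    split
    · split
      · rfl
      · exact ih (i + 1) j (by omega) (by omega) hj h1 h2
    · exact ih (i + 1) j (by omega) (by omega) hj h1 h2

theorem splitLoop_no (s t : List Char) (pos : List Int) :
    ∀ (d i : Nat), t.length - i = d →
      (∀ j, i ≤ j → j < t.length →
        ¬(canBuildSub s (t.take (j + 1)) = true ∧ canBuildSub s (t.drop (j + 1)) = true)) →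
      splitLoop s t pos i = "NO" := by
  intro d
  induction d with
  | zero =>
    intro i hd hno
    rw [splitLoop, if_neg (by omega)]
  | succ d ih =>
    intro i hd hno
    rw [splitLoop, if_pos (by omega)]
    split
    · rename_i h1
      split
      · rename_i h2
        exact absurd ⟨h1, h2⟩ (hno i (le_refl i) (by omega))
      · exact ih (i + 1) (by omega) (fun j hij hj => hno j (by omega) hj)
    · exact ih (i + 1) (by omega) (fun j hij hj => hno j (by omega) hj)

-- ===== VERDICT (by name: the statement is the Claim_ definition above) =====
theorem can_build_string_spec : Claim_equal_can_build_string := by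
  unfold Claim_equal_can_build_string
  intro s t _ hpre
  unfold Spec_can_build_string
  have hB : can_build_string_alt s t =
      if t.toList.length ≤ gm s.toList t.toList + gm s.toList.reverse t.toList.reverse
      then "YES" else "NO" := by
    simp only [can_build_string_alt]
    rw [foldP_eq t.toList s.toList 0, foldQ_eq t.toList s.toList.reverse]
    simp
  rw [hB]
  by_cases hsub : canBuildSub s.toList t.toList = true
  · have hPn : gm s.toList t.toList = t.toList.length := (canBuildSub_iff _ _).mp hsub
    unfold can_build_string
    rw [if_pos hsub, if_pos (by omega)]
  · have hPn : gm s.toList t.toList ≠ t.toList.length := fun h =>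
      hsub ((canBuildSub_iff _ _).mpr h)
    have hP := gm_le s.toList t.toList
    have hQ := gm_le s.toList.reverse t.toList.reverse
    rw [List.length_reverse] at hQ
    have hchars : ∀ c ∈ s.toList, 71 ≤ c.toNat ∧ c.toNat ≤ 122 := by
      rcases hpre with h | h
      · simpa using h
      · exact absurd ((gm_eq_length_iff _ _).mpr h) hPn
    obtain ⟨posr, hpos⟩ := buildPos_some s.toList hchars (List.replicate 26 0) (by simp)
    unfold can_build_string
    rw [if_neg hsub, hpos]
    by_cases hyes : t.toList.length ≤ gm s.toList t.toList + gm s.toList.reverse t.toList.reverse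
    · rw [if_pos hyes]
      have hQn : gm s.toList.reverse t.toList.reverse ≠ t.toList.length := by
        intro h
        apply hPn
        apply (gm_eq_length_iff _ _).mpr
        apply List.reverse_sublist.mp
        apply (gm_eq_length_iff _ _).mp
        rw [h, List.length_reverse]
      have h1P : 1 ≤ gm s.toList t.toList := by omega
      apply splitLoop_yes s.toList t.toList posr (gm s.toList t.toList - 1) 0
        (gm s.toList t.toList - 1) rfl (by omega) (by omega)
      · rw [show gm s.toList t.toList - 1 + 1 = gm s.toList t.toList by omega]
        exact (canBuildSub_take_iff _ _ _ (by omega)).mpr (le_refl _)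
      · rw [show gm s.toList t.toList - 1 + 1 = gm s.toList t.toList by omega]
        exact (canBuildSub_drop_iff _ _ _ (by omega)).mpr (by omega)
    · rw [if_neg hyes]
      apply splitLoop_no s.toList t.toList posr t.toList.length 0 (by omega)
      intro j _ hj hc
      obtain ⟨h1, h2⟩ := hc
      have ht : j + 1 ≤ gm s.toList t.toList :=
        (canBuildSub_take_iff _ _ _ (by omega)).mp h1
      have hd : t.toList.length - (j + 1) ≤ gm s.toList.reverse t.toList.reverse :=
        (canBuildSub_drop_iff _ _ _ (by omega)).mp h2
      omega
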